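-- pv_equiv track=rewrite | github.com/Egor53510/Pet-Projects | Algorithm Training 5.0 Lesson 3/deleting numbers.py | min_numbers_to_remove
-- ===== SOURCE A (Python) =====
-- def min_numbers_to_remove(n, arr):
--     freq_map = {}
--     for num in arr:
--         if num in freq_map:
--             freq_map[num] += 1
--         else:
--             freq_map[num] = 1
--
--     result = 0
--     for key in freq_map:
--         if key - 1 in freq_map and key + 1 in freq_map:
--             result = max(result, freq_map[key - 1] + freq_map[key] + freq_map[key + 1])
--         elif key - 1 in freq_map:
--             result = max(result, freq_map[key - 1] + freq_map[key])
--         elif key + 1 in freq_map: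
--             result = max(result, freq_map[key] + freq_map[key + 1])
--         else:
--             result = max(result, freq_map[key])
--
--     return n - result
-- ===== SOURCE B (Python) =====
-- def min_numbers_to_remove(n, arr):
--     cnt = {}
--     for x in arr:
--         cnt[x] = cnt.get(x, 0) + 1
--     pairs = sorted(cnt.items(), key=lambda p: p[0])
--     best = 0
--     prev = None
--     for i, (v, c) in enumerate(pairs):
--         s = c
--         if prev is not None and prev[0] == v - 1:
--             s = s + prev[1]
--         if i + 1 < len(pairs) and pairs[i + 1][0] == v + 1:
--             s = s + pairs[i + 1][1]
--         best = max(best, s)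
--         prev = (v, c)
--     return n - best
-- ===== Notes on version B (the rewrite author's own statement) =====
-- stated objective: alternative
-- what changed: B replaces A's per-key dict lookups of key-1/key+1 by one scan over the sorted distinct (value, count) pairs, reading the consecutive neighbours from the adjacent entries (previous pair carried, next pair looked ahead).
import Mathlib
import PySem

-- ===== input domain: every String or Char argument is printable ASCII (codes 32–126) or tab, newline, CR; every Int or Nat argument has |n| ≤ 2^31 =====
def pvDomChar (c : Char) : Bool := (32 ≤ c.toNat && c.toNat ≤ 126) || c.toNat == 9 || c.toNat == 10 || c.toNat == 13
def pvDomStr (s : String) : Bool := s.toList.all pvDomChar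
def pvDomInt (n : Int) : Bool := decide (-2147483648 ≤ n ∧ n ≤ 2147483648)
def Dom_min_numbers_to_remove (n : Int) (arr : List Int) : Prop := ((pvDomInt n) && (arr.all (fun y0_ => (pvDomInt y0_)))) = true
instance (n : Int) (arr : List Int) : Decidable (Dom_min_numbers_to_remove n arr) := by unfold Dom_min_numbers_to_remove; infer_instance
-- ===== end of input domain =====

-- B replaces A's per-key ±1 dict membership tests by one pass over the sorted distinct
-- (value, count) pairs, reading the consecutive neighbours from the adjacent entries
-- (previous entry carried, next entry looked ahead); objective: alternative.

-- ===== PORT A =====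
def min_numbers_to_remove (n : Int) (arr : List Int) : Int :=
  -- freq_map built by the membership-tested branch, exactly as in A
  let freq_map := arr.foldl
    (fun d num => if d.contains num then d.modify num 0 (· + 1) else d.insert num 1)
    PySem.Dict.empty
  -- freq_map[k] is ported as getD k 0: every access is guarded by membership
  -- (or iterates the keys), so the default is never used
  let result := freq_map.keys.foldl
    (fun result key =>
      if freq_map.contains (key - 1) && freq_map.contains (key + 1) then
        max result (freq_map.getD (key - 1) 0 + freq_map.getD key 0 + freq_map.getD (key + 1) 0)
      else if freq_map.contains (key - 1) then
        max result (freq_map.getD (key - 1) 0 + freq_map.getD key 0)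
      else if freq_map.contains (key + 1) then
        max result (freq_map.getD key 0 + freq_map.getD (key + 1) 0)
      else
        max result (freq_map.getD key 0))
    0
  n - result

-- ===== PORT B =====
-- the loop over enumerate(pairs): `prev` is the previous pair, `pairs[i+1]` is the
-- head of the remaining list
def pvBestLoop (best : Int) (prev : Option (Int × Int)) : List (Int × Int) → Int
  | [] => best
  | (v, c) :: rest =>
    let s := c
    let s := match prev with
      | some (pv, pc) => if pv = v - 1 then s + pc else s
      | none => s
    let s := match rest with
      | (nv, nc) :: _ => if nv = v + 1 then s + nc else s
      | [] => s
    pvBestLoop (max best s) (some (v, c)) rest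

def min_numbers_to_remove_alt (n : Int) (arr : List Int) : Int :=
  let cnt := arr.foldl (fun d x => d.insert x (d.getD x 0 + 1)) PySem.Dict.empty
  let pairs := PySem.List.sorted cnt.items (fun p => p.1) false
  n - pvBestLoop 0 none pairs

-- ===== PRECONDITION & SPEC =====
def Spec_min_numbers_to_remove (n : Int) (arr : List Int) (out : Int) : Prop := out = min_numbers_to_remove_alt n arr
instance (n : Int) (arr : List Int) (out : Int) : Decidable (Spec_min_numbers_to_remove n arr out) := by unfold Spec_min_numbers_to_remove; infer_instance

-- ===== CLAIM (what is proved, stated in full; the proofs are below) =====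
def Claim_equal_min_numbers_to_remove : Prop := ∀ (n : Int) (arr : List Int), Dom_min_numbers_to_remove n arr → Spec_min_numbers_to_remove n arr (min_numbers_to_remove n arr)

-- ===== LEMMAS AND PROOFS =====

-- the value A's branch chain computes for a key, written over arr directly
def pvTval (arr : List Int) (k : Int) : Int :=
  (if (k - 1) ∈ arr then (arr.count (k - 1) : Int) else 0)
  + (arr.count k : Int)
  + (if (k + 1) ∈ arr then (arr.count (k + 1) : Int) else 0)

-- A's dict-building loop builds Counter(arr)
lemma pvFreqEq (arr : List Int) :
    arr.foldl (fun d num => if d.contains num then d.modify num 0 (· + 1) else d.insert num 1)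
      PySem.Dict.empty = PySem.Dict.counter arr := by
  rw [PySem.Dict.counter_eq_foldl]
  apply PySem.List.foldl_congr_mem
  intro d x _
  by_cases h : d.contains x
  · simp [h]
  · simp only [h, Bool.false_eq_true, if_false, PySem.Dict.modify]
    rw [PySem.Dict.getD_of_not_contains d 0 (by simpa using h)]
    norm_num

-- A's per-key branch value is pvTval
lemma pvBranchEq (arr : List Int) (r k : Int) :
    (if (PySem.Dict.counter arr).contains (k - 1) && (PySem.Dict.counter arr).contains (k + 1) then
        max r ((PySem.Dict.counter arr).getD (k - 1) 0 + (PySem.Dict.counter arr).getD k 0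
               + (PySem.Dict.counter arr).getD (k + 1) 0)
      else if (PySem.Dict.counter arr).contains (k - 1) then
        max r ((PySem.Dict.counter arr).getD (k - 1) 0 + (PySem.Dict.counter arr).getD k 0)
      else if (PySem.Dict.counter arr).contains (k + 1) then
        max r ((PySem.Dict.counter arr).getD k 0 + (PySem.Dict.counter arr).getD (k + 1) 0)
      else
        max r ((PySem.Dict.counter arr).getD k 0)) = max r (pvTval arr k) := by
  simp only [PySem.Dict.contains_counter, PySem.Dict.getD_counter, List.contains_eq_mem, pvTval]
  by_cases h1 : (k - 1) ∈ arr <;> by_cases h2 : (k + 1) ∈ arr <;> simp [h1, h2]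

-- the sorted-scan loop computes the fold of max pvTval over the remaining sorted keys
lemma pvLoopLemma (arr : List Int) : ∀ (K : List Int) (prev : Option (Int × Int)) (best : Int),
    (∀ v ∈ K, v ∈ arr) →
    K.Pairwise (· < ·) →
    (match prev with
      | none => ∀ x ∈ arr, x ∈ K
      | some (pv, pc) => pc = (arr.count pv : Int) ∧ pv ∈ arr ∧ (∀ v ∈ K, pv < v)
          ∧ (∀ x ∈ arr, x ∈ K ∨ x ≤ pv)) →
    pvBestLoop best prev (K.map (fun k => (k, (arr.count k : Int)))) =
      K.foldl (fun b k => max b (pvTval arr k)) best := by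
  intro K
  induction K with
  | nil => intro prev best _ _ _; cases prev <;> rfl
  | cons k rest ih =>
    intro prev best hsub hsorted hprev
    obtain ⟨hklt, hrestsorted⟩ := List.pairwise_cons.mp hsorted
    have hkarr : k ∈ arr := hsub k (by simp)
    simp only [List.map_cons, pvBestLoop, List.foldl_cons]
    rcases prev with _ | ⟨pv, pc⟩
    · -- prev = none
      have hcov : ∀ x ∈ arr, x ∈ (k :: rest) := hprev
      have hl : (k - 1) ∉ arr := by
        intro hm
        rcases List.mem_cons.mp (hcov _ hm) with h | h
        · omega
        · have := hklt _ h; omega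
      have hcov' : ∀ x ∈ arr, x ∈ rest ∨ x ≤ k := by
        intro x hx
        rcases List.mem_cons.mp (hcov _ hx) with h | h
        · right; omega
        · left; exact h
      rcases rest with _ | ⟨r0, rtl⟩
      · -- no next element
        have hr : (k + 1) ∉ arr := by
          intro hm
          rcases List.mem_cons.mp (hcov _ hm) with h | h
          · omega
          · simp at h
        simp [pvBestLoop, pvTval, hl, hr]
      · have hr0 : k < r0 := hklt r0 (by simp)
        have hs : (if r0 = k + 1 then (arr.count k : Int) + (arr.count r0 : Int)
              else (arr.count k : Int)) = pvTval arr k := by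
          by_cases he : r0 = k + 1
          · subst he
            have hm : (k + 1) ∈ arr := hsub _ (by simp)
            simp [pvTval, hl, hm]
          · have hr : (k + 1) ∉ arr := by
              intro hm
              rcases List.mem_cons.mp (hcov _ hm) with h | h
              · omega
              · rcases List.mem_cons.mp h with h' | h'
                · exact he h'.symm
                · have := (List.pairwise_cons.mp hrestsorted).1 _ h'; omega
            simp [pvTval, hl, hr, he]
        simp only [List.map_cons]
        rw [hs]
        exact ih (some (k, (arr.count k : Int))) _ (fun v hv => hsub v (by simp [hv]))
          hrestsorted ⟨rfl, hkarr, hklt, hcov'⟩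
    · -- prev = some (pv, pc)
      obtain ⟨hpc, hpvarr, hpvlt, hcover⟩ := hprev
      have hpvk : pv < k := hpvlt k (by simp)
      have hlv : (if pv = k - 1 then (arr.count k : Int) + pc else (arr.count k : Int))
          = (if (k - 1) ∈ arr then (arr.count (k - 1) : Int) else 0) + (arr.count k : Int) := by
        by_cases he : pv = k - 1
        · have hm : (k - 1) ∈ arr := he ▸ hpvarr
          subst he
          simp [hm, hpc]; ring
        · have hl : (k - 1) ∉ arr := by
            intro hm
            rcases hcover _ hm with h | h
            · rcases List.mem_cons.mp h with h' | h'
              · omega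
              · have := hklt _ h'; omega
            · omega
          simp [hl, he]
      have hcov' : ∀ x ∈ arr, x ∈ rest ∨ x ≤ k := by
        intro x hx
        rcases hcover _ hx with h | h
        · rcases List.mem_cons.mp h with h' | h'
          · right; omega
          · left; exact h'
        · right; omega
      rcases rest with _ | ⟨r0, rtl⟩
      · have hr : (k + 1) ∉ arr := by
          intro hm
          rcases hcover _ hm with h | h
          · rcases List.mem_cons.mp h with h' | h'
            · omega
            · simp at h'
          · omega
        simp only [List.map_nil, pvBestLoop, List.foldl_nil]
        rw [hlv]
        simp [pvTval, hr]
      · have hr0 : k < r0 := hklt r0 (by simp)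
        have hs : (if pv = k - 1 then (arr.count k : Int) + pc else (arr.count k : Int))
              + (if r0 = k + 1 then (arr.count r0 : Int) else 0) = pvTval arr k := by
          rw [hlv]
          by_cases he : r0 = k + 1
          · subst he
            have hm : (k + 1) ∈ arr := hsub _ (by simp)
            simp [pvTval, hm]
          · have hr : (k + 1) ∉ arr := by
              intro hm
              rcases hcover _ hm with h | h
              · rcases List.mem_cons.mp h with h' | h'
                · omega
                · rcases List.mem_cons.mp h' with h'' | h''
                  · exact he h''.symm
                  · have := (List.pairwise_cons.mp hrestsorted).1 _ h''; omega
              · omega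
            simp [pvTval, hr, he]
        simp only [List.map_cons]
        have hstep : (if r0 = k + 1
              then (if pv = k - 1 then (arr.count k : Int) + pc else (arr.count k : Int)) + (arr.count r0 : Int)
              else (if pv = k - 1 then (arr.count k : Int) + pc else (arr.count k : Int)))
            = pvTval arr k := by
          rw [← hs]; by_cases he : r0 = k + 1 <;> simp [he]
        rw [hstep]
        exact ih (some (k, (arr.count k : Int))) _ (fun v hv => hsub v (by simp [hv]))
          hrestsorted ⟨rfl, hkarr, hklt, hcov'⟩

-- fold of max is invariant under permutation
lemma pvFoldMaxPerm (arr : List Int) {l1 l2 : List Int} (h : l1.Perm l2) (b : Int) :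
    l1.foldl (fun b k => max b (pvTval arr k)) b = l2.foldl (fun b k => max b (pvTval arr k)) b := by
  have : RightCommutative (fun (b : Int) (k : Int) => max b (pvTval arr k)) :=
    ⟨fun b x y => max_right_comm b (pvTval arr x) (pvTval arr y)⟩
  exact h.foldl_eq b

-- ===== VERDICT (by name: the statement is the Claim_ definition above) =====
theorem min_numbers_to_remove_spec : Claim_equal_min_numbers_to_remove := by
  intro n arr _
  unfold Spec_min_numbers_to_remove min_numbers_to_remove min_numbers_to_remove_alt
  simp only [pvFreqEq, PySem.Dict.foldl_insert_getD_add_one_eq_counter]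
  -- A's key loop is the fold of max pvTval over the counter's keys
  have hA : (PySem.Dict.counter arr).keys.foldl
      (fun result key =>
        if (PySem.Dict.counter arr).contains (key - 1) && (PySem.Dict.counter arr).contains (key + 1) then
          max result ((PySem.Dict.counter arr).getD (key - 1) 0 + (PySem.Dict.counter arr).getD key 0
                      + (PySem.Dict.counter arr).getD (key + 1) 0)
        else if (PySem.Dict.counter arr).contains (key - 1) then
          max result ((PySem.Dict.counter arr).getD (key - 1) 0 + (PySem.Dict.counter arr).getD key 0)
        else if (PySem.Dict.counter arr).contains (key + 1) then
          max result ((PySem.Dict.counter arr).getD key 0 + (PySem.Dict.counter arr).getD (key + 1) 0)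
        else
          max result ((PySem.Dict.counter arr).getD key 0)) 0
      = (PySem.Dict.counter arr).keys.foldl (fun b k => max b (pvTval arr k)) 0 := by
    apply PySem.List.foldl_congr_mem
    intro r k _
    exact pvBranchEq arr r k
  -- B's sorted pairs are the sorted distinct values paired with their counts
  have hpairs : PySem.List.sorted (PySem.Dict.counter arr).items (fun p => p.1) false
      = (PySem.List.sorted (PySem.Set.ofList arr) (fun x => x) false).map
          (fun k => (k, (arr.count k : Int))) := by
    rw [PySem.Dict.items_counter]
    apply PySem.List.sorted_eq_of_perm_of_pairwise_lt
    · exact (PySem.List.sorted_perm (PySem.Set.ofList arr) (fun x => x) false).map _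
    · rw [List.pairwise_map]
      exact PySem.List.sorted_ofList_pairwise_lt arr
  have hB : pvBestLoop 0 none
      ((PySem.List.sorted (PySem.Set.ofList arr) (fun x => x) false).map
        (fun k => (k, (arr.count k : Int))))
      = (PySem.List.sorted (PySem.Set.ofList arr) (fun x => x) false).foldl
          (fun b k => max b (pvTval arr k)) 0 := by
    apply pvLoopLemma
    · intro v hv
      rw [PySem.List.mem_sorted] at hv
      exact (PySem.Set.mem_ofList arr v).mp hv
    · exact PySem.List.sorted_ofList_pairwise_lt arr
    · intro x hx
      rw [PySem.List.mem_sorted]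
      exact (PySem.Set.mem_ofList arr x).mpr hx
  rw [hA, hpairs, hB]
  have hperm : (PySem.List.sorted (PySem.Set.ofList arr) (fun x => x) false).Perm
      (PySem.Dict.counter arr).keys := by
    rw [PySem.Dict.keys_counter]
    exact PySem.List.sorted_perm _ _ _
  rw [pvFoldMaxPerm arr hperm 0]
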